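-- pv_equiv track=rewrite | github.com/Jonggil-dev/Algo | 정종길/프로그래머스/(다시 풀기) 자동완성.py | solution
-- ===== SOURCE A (Python) =====
-- def solution(words):
--     N = len(words)
--     words.sort()
--     result = [0] * N
--
--     for i in range(N - 1):
--         a = len(words[i])
--         b = len(words[i + 1])
--         for j in range(min(a, b)):
--             if words[i][j] != words[i + 1][j]:
--                 j -= 1
--                 break
--
--         result[i] = max(result[i], min(a, j + 2))
--         result[i + 1] = max(result[i + 1], j + 2)
--
--     return sum(result)
-- ===== SOURCE B (Python) =====
-- def solution(words):
--     # Prefix-counting instead of sorting: count every prefix (including the empty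
--     # one) of every word once in a dict; a word then needs its shortest prefix
--     # whose count is 1 (all of its characters if none is unique), and each extra
--     # copy of a duplicated word costs its full length plus one more keystroke.
--     # Each distinct word is processed once.  No sort, no neighbour comparison;
--     # A sorts its argument in place, B does not mutate it.
--     cnt = {}
--     wc = {}
--     for w in words:
--         wc[w] = wc.get(w, 0) + 1
--         for d in range(len(w) + 1):
--             p = w[:d]
--             cnt[p] = cnt.get(p, 0) + 1
--     total = 0
--     for w, c in wc.items():
--         presses = len(w)
--         for d in range(len(w) + 1):
--             if cnt[w[:d]] == 1:
--                 presses = d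
--                 break
--         total += presses + (c - 1) * (len(w) + 1)
--     return total
-- ===== Notes on version B (the rewrite author's own statement) =====
-- stated objective: alternative
-- what changed: B replaces A's sort + adjacent-LCP neighbour scan and mutable result array by dictionaries built in one pass: a count of every prefix of every word and a word-multiplicity counter; each distinct word is then charged its shortest prefix whose count is 1 (its full length if none) plus len+1 per extra copy - no sorting, no neighbour comparison; B also does not mutate its argument, while A sorts it in place.
-- crash fix: On lists of at least two words containing the empty string, A raises UnboundLocalError (its inner loop variable j is never assigned for the empty first sorted word); B returns the natural total, counting 0 presses for the empty word. — e.g. on solution(["", "a"]): A raises UnboundLocalError, B returns 1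
import Mathlib
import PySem

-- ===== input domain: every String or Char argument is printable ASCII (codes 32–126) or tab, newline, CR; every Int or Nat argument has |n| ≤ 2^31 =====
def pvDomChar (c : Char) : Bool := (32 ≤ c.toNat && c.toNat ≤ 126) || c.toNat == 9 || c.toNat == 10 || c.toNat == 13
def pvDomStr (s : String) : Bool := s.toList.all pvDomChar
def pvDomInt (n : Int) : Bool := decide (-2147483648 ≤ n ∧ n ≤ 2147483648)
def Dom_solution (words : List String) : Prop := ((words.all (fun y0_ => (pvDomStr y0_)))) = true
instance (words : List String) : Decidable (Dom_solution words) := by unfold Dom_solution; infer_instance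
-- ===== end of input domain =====

-- B replaces sort + adjacent-LCP scanning by a prefix-count dictionary (alternative
-- algorithm, similar cost).  NOTE: Python A sorts `words` in place (an observable
-- mutation); B does not mutate its argument — the equivalence proved here is about
-- the return value.

-- ===== PORT A =====
-- A's inner `for j in range(stop)` loop, returning the final value of j.  When stop = 0 the
-- Python never assigns j (UnboundLocalError on the first pair, excluded by Pre_); the port
-- returns stop - 1 = -1 there.  Indices j are always in range (j < stop ≤ both lengths).
-- (structural recursion on `rem`, the number of iterations left: rem = stop - j)
def pvJLoop (x y : String) (j : Nat) : Nat → Int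
  | 0 => (j : Int) - 1
  | rem + 1 =>
    if PySem.List.pyGetD x.toList (j : Int) ' ' ≠ PySem.List.pyGetD y.toList (j : Int) ' ' then
      (j : Int) - 1
    else pvJLoop x y (j + 1) rem

def solution (words : List String) : Int :=
  let N : Int := words.length
  let ws := PySem.List.sorted words (fun x => x) false
  let result : List Int := List.replicate N.toNat 0
  let result := (PySem.List.pyRange 0 (N - 1) 1).foldl (fun res i =>
    let a : Int := PySem.Str.len (PySem.List.pyGetD ws i "")
    let b : Int := PySem.Str.len (PySem.List.pyGetD ws (i + 1) "")
    let j : Int := pvJLoop (PySem.List.pyGetD ws i "") (PySem.List.pyGetD ws (i + 1) "") 0 (min a b).toNat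
    let res := PySem.List.pySetD res i (max (PySem.List.pyGetD res i 0) (min a (j + 2)))
    PySem.List.pySetD res (i + 1) (max (PySem.List.pyGetD res (i + 1) 0) (j + 2))) result
  result.sum

-- ===== PORT B =====
-- the inner `for d in range(len(w)+1): cnt[p] = cnt.get(p, 0) + 1` prefix loop
def prefLoop (cnt : PySem.Dict String Int) (w : String) : PySem.Dict String Int :=
  (PySem.List.pyRange 0 (PySem.Str.len w + 1) 1).foldl (fun cnt d =>
    cnt.insert (PySem.Str.slice w none (some d))
      (cnt.getD (PySem.Str.slice w none (some d)) 0 + 1)) cnt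

-- second pass body: first d in range(0, len(w)+1) with cnt[w[:d]] == 1, else len(w); the
-- key w[:d] is always present (it was counted in the first pass), so `getD _ 0` is exact.
def pressLoop (cnt : PySem.Dict String Int) (w : String) : List Int → Int
  | [] => PySem.Str.len w
  | d :: ds =>
    if cnt.getD (PySem.Str.slice w none (some d)) 0 == 1 then d else pressLoop cnt w ds

def solution_alt (words : List String) : Int :=
  let s := words.foldl (fun (s : PySem.Dict String Int × PySem.Dict String Int) w =>
    (prefLoop s.1 w, s.2.insert w (s.2.getD w 0 + 1)))
    (PySem.Dict.empty, PySem.Dict.empty)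
  let cnt := s.1
  let wc := s.2
  wc.items.foldl (fun total p =>
    total + (pressLoop cnt p.1 (PySem.List.pyRange 0 (PySem.Str.len p.1 + 1) 1)
      + (p.2 - 1) * (PySem.Str.len p.1 + 1))) 0

-- ===== PRECONDITION & SPEC =====
-- Pre_ excludes exactly the lists of ≥ 2 words containing "" — there the Python A
-- RAISES UnboundLocalError (its inner loop variable j is never assigned for the empty
-- first sorted word); see Raises_ below.  A returns normally everywhere else.
def Pre_solution (words : List String) : Prop := "" ∈ words → words.length ≤ 1
instance (words : List String) : Decidable (Pre_solution words) := by
  unfold Pre_solution; infer_instance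
def pvWitness_solution : List String := ["go", "gone", "guild", "band"]

def Spec_solution (words : List String) (out : Int) : Prop := out = solution_alt words
instance (words : List String) (out : Int) : Decidable (Spec_solution words out) := by
  unfold Spec_solution; infer_instance

-- On lists of ≥ 2 words containing the empty string A raises UnboundLocalError;
-- B returns the natural total, counting 0 presses for the empty word.
def Raises_solution (words : List String) : Prop := "" ∈ words ∧ 2 ≤ words.length
instance (words : List String) : Decidable (Raises_solution words) := by
  unfold Raises_solution; infer_instance
def pvRaiseWitness_solution : List String := ["", "a"]
def pvRaiseWitnessOut_solution : Int := 1

-- ===== CLAIM (what is proved, stated in full; the proofs are below) =====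
def Claim_equal_solution : Prop := ∀ (words : List String), Dom_solution words → Pre_solution words → Spec_solution words (solution words)
def Claim_raises_solution : Prop := (∀ (words : List String), Dom_solution words → Raises_solution words → ¬ Pre_solution words) ∧ (Dom_solution (pvRaiseWitness_solution) ∧ Raises_solution (pvRaiseWitness_solution) ∧ solution_alt (pvRaiseWitness_solution) = pvRaiseWitnessOut_solution)

-- ===== LEMMAS AND PROOFS =====

-- longest common prefix length of two character lists
def lcp : List Char → List Char → Nat
  | a :: x, b :: y => if a = b then lcp x y + 1 else 0
  | _, _ => 0

theorem lcp_le_left : ∀ x y : List Char, lcp x y ≤ x.length := by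
  intro x
  induction x with
  | nil => intro y; cases y <;> simp [lcp]
  | cons a x ih =>
    intro y
    cases y with
    | nil => simp [lcp]
    | cons b y =>
      simp only [lcp, List.length_cons]
      split_ifs
      · exact Nat.succ_le_succ (ih y)
      · omega

theorem lcp_le_right : ∀ x y : List Char, lcp x y ≤ y.length := by
  intro x
  induction x with
  | nil => intro y; cases y <;> simp [lcp]
  | cons a x ih =>
    intro y
    cases y with
    | nil => simp [lcp]
    | cons b y =>
      simp only [lcp, List.length_cons]
      split_ifs
      · exact Nat.succ_le_succ (ih y)
      · omega

theorem lcp_getD_eq : ∀ (x y : List Char) (j : Nat), j < lcp x y →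
    x.getD j ' ' = y.getD j ' ' := by
  intro x
  induction x with
  | nil => intro y j h; simp [lcp] at h
  | cons a x ih =>
    intro y j h
    cases y with
    | nil => simp [lcp] at h
    | cons b y =>
      simp only [lcp] at h
      split_ifs at h with hab
      · cases j with
        | zero => simpa using hab
        | succ j => simpa using ih y j (by omega)
      · omega

theorem lcp_getD_ne : ∀ (x y : List Char), lcp x y < x.length → lcp x y < y.length →
    x.getD (lcp x y) ' ' ≠ y.getD (lcp x y) ' ' := by
  intro x
  induction x with
  | nil => intro y h; simp at h
  | cons a x ih =>
    intro y h1 h2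
    cases y with
    | nil => simp at h2
    | cons b y =>
      simp only [lcp, List.length_cons] at h1 h2 ⊢
      split_ifs with hab
      · simp only [List.getD_cons_succ]
        exact ih y (by simpa [hab] using h1) (by simpa [hab] using h2)
      · simpa using hab

-- ---- A-side ----
theorem pvJLoop_eq (x y : String) : ∀ (rem j : Nat),
    j + rem ≤ x.toList.length → j + rem ≤ y.toList.length → j ≤ lcp x.toList y.toList →
    pvJLoop x y j rem = (min (lcp x.toList y.toList) (j + rem) : Int) - 1 := by
  intro rem
  induction rem with
  | zero =>
    intro j h1 h2 hl
    simp only [pvJLoop]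
    omega
  | succ rem ih =>
    intro j h1 h2 hl
    rcases eq_or_lt_of_le hl with heq | hlt
    · have hne : x.toList.getD j ' ' ≠ y.toList.getD j ' ' := by
        have := lcp_getD_ne x.toList y.toList (by omega) (by omega)
        rwa [← heq] at this
      simp only [pvJLoop, PySem.List.pyGetD_natCast, if_pos hne]
      omega
    · have heqc : x.toList.getD j ' ' = y.toList.getD j ' ' := lcp_getD_eq _ _ j hlt
      have hrec := ih (j + 1) (by omega) (by omega) (by omega)
      simp only [pvJLoop, PySem.List.pyGetD_natCast, heqc, ne_eq, not_true_eq_false, if_false]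
      rw [hrec]
      omega

def lcpAt (l : List String) (k : Nat) : Nat := lcp (l.getD k "").toList (l.getD (k + 1) "").toList

def gAt (l : List String) (m : Nat) : Int := if m = 0 then 0 else (lcpAt l (m - 1) : Int) + 1

def fAt (l : List String) (k : Nat) : Int :=
  max (gAt l k) (min ((l.getD k "").toList.length : Int) ((lcpAt l k : Int) + 1))

def stepA (l : List String) (res : List Int) (i : Int) : List Int :=
  PySem.List.pySetD
    (PySem.List.pySetD res i
      (max (PySem.List.pyGetD res i 0)
        (min (PySem.Str.len (PySem.List.pyGetD l i ""))
          (pvJLoop (PySem.List.pyGetD l i "") (PySem.List.pyGetD l (i + 1) "") 0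
              (min (PySem.Str.len (PySem.List.pyGetD l i ""))
                (PySem.Str.len (PySem.List.pyGetD l (i + 1) ""))).toNat + 2))))
    (i + 1)
    (max
      (PySem.List.pyGetD
        (PySem.List.pySetD res i
          (max (PySem.List.pyGetD res i 0)
            (min (PySem.Str.len (PySem.List.pyGetD l i ""))
              (pvJLoop (PySem.List.pyGetD l i "") (PySem.List.pyGetD l (i + 1) "") 0
                  (min (PySem.Str.len (PySem.List.pyGetD l i ""))
                    (PySem.Str.len (PySem.List.pyGetD l (i + 1) ""))).toNat + 2))))
        (i + 1) 0)
      (pvJLoop (PySem.List.pyGetD l i "") (PySem.List.pyGetD l (i + 1) "") 0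
          (min (PySem.Str.len (PySem.List.pyGetD l i ""))
            (PySem.Str.len (PySem.List.pyGetD l (i + 1) ""))).toNat + 2))

theorem solution_eq_fold (words : List String) : solution words =
    ((PySem.List.pyRange 0 ((words.length : Int) - 1) 1).foldl
      (stepA (PySem.List.sorted words (fun x => x) false))
      (List.replicate ((words.length : Int)).toNat 0)).sum := rfl

theorem jval (l : List String) (m : Nat) :
    pvJLoop (l.getD m "") (l.getD (m + 1) "") 0
      (min (PySem.Str.len (l.getD m "")) (PySem.Str.len (l.getD (m + 1) ""))).toNat
    = (lcpAt l m : Int) - 1 := by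
  have hstop : (min (PySem.Str.len (l.getD m "")) (PySem.Str.len (l.getD (m + 1) ""))).toNat
      = min (l.getD m "").toList.length (l.getD (m + 1) "").toList.length := by
    simp only [PySem.Str.len_eq]; omega
  rw [hstop, pvJLoop_eq _ _ _ 0 (by omega) (by omega) (Nat.zero_le _)]
  have h1 := lcp_le_left (l.getD m "").toList (l.getD (m + 1) "").toList
  have h2 := lcp_le_right (l.getD m "").toList (l.getD (m + 1) "").toList
  unfold lcpAt
  omega

theorem mapRange_getD (n k : Nat) (f : Nat → Int) :
    ((List.range n).map f).getD k 0 = if k < n then f k else 0 := by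
  rcases Nat.lt_or_ge k n with hlt | hge
  · rw [List.getD_eq_getElem _ _ (by simpa using hlt)]
    simp [hlt]
  · rw [List.getD_eq_default _ _ (by simpa using hge)]
    simp; omega

theorem foldA (l : List String) : ∀ (m : Nat), m + 1 ≤ l.length →
    (PySem.List.pyRange 0 (m : Int) 1).foldl (stepA l) (List.replicate l.length 0)
      = (List.range l.length).map
          (fun k => if k < m then fAt l k else if k = m then gAt l k else 0) := by
  intro m
  induction m with
  | zero =>
    intro _
    rw [Nat.cast_zero, PySem.List.pyRange_one_eq_nil le_rfl, List.foldl_nil]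
    apply List.ext_getElem (by simp)
    intro k h1 h2
    simp only [List.getElem_replicate, List.getElem_map, List.getElem_range, gAt]
    split_ifs <;> omega
  | succ m ih =>
    intro hm
    have hc : ((m + 1 : Nat) : Int) = (m : Int) + 1 := by push_cast; ring
    rw [hc, PySem.List.pyRange_one_succ_right (by omega), List.foldl_append, List.foldl_cons,
      List.foldl_nil, ih (by omega)]
    set prev := (List.range l.length).map
      (fun k => if k < m then fAt l k else if k = m then gAt l k else 0) with hprevdef
    have hget : ∀ k : Nat, prev.getD k 0
        = if k < l.length then (if k < m then fAt l k else if k = m then gAt l k else 0) else 0 := by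
      intro k; rw [hprevdef, mapRange_getD]
    unfold stepA
    have hc1 : (m : Int) + 1 = ((m + 1 : Nat) : Int) := by push_cast; ring
    rw [hc1]
    simp only [PySem.List.pyGetD_natCast, PySem.List.pySetD_natCast, jval]
    have hjj : (lcpAt l m : Int) - 1 + 2 = (lcpAt l m : Int) + 1 := by ring
    rw [hjj]
    have hgm : prev.getD m 0 = gAt l m := by
      rw [hget m]; split_ifs <;> first | rfl | omega
    have hset : (prev.set m (max (gAt l m)
        (min (PySem.Str.len (l.getD m "")) ((lcpAt l m : Int) + 1)))).getD (m + 1) 0 = 0 := by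
      have hlen : m + 1 < prev.length := by simp [hprevdef]; omega
      rw [List.getD_eq_getElem _ _ (by simpa using hlen), List.getElem_set]
      rw [if_neg (by omega)]
      have := hget (m + 1)
      rw [List.getD_eq_getElem _ _ hlen] at this
      rw [this]
      split_ifs <;> omega
    rw [hgm, hset]
    have hmax : max (0 : Int) ((lcpAt l m : Int) + 1) = gAt l (m + 1) := by
      simp only [gAt, if_neg (Nat.succ_ne_zero m), Nat.add_sub_cancel]
      omega
    rw [hmax]
    have hfm : max (gAt l m) (min (PySem.Str.len (l.getD m "")) ((lcpAt l m : Int) + 1))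
        = fAt l m := by
      simp only [fAt, PySem.Str.len_eq]
    rw [hfm]
    apply List.ext_getElem (by simp [hprevdef])
    intro k h1 h2
    simp only [List.getElem_set, List.getElem_map, List.getElem_range]
    have hkp : k < prev.length := by simpa [hprevdef] using h2
    by_cases hk1 : k = m + 1
    · subst hk1
      rw [if_pos rfl]
      have : ¬ (m + 1 < m + 1) := by omega
      rw [if_neg this, if_pos rfl]
    · rw [if_neg (fun h => hk1 h.symm)]
      by_cases hk2 : k = m
      · subst hk2
        rw [if_pos rfl, if_pos (by omega)]
      · rw [if_neg (fun h => hk2 h.symm)]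
        have hpk : prev[k] = if k < m then fAt l k else if k = m then gAt l k else 0 := by
          simp [hprevdef]
        rw [hpk]
        split_ifs <;> omega

-- ---- lcp facts used by the B-side ----
theorem lcp_take_eq : ∀ x y : List Char, x.take (lcp x y) = y.take (lcp x y) := by
  intro x
  induction x with
  | nil => intro y; cases y <;> simp [lcp]
  | cons a x ih =>
    intro y
    cases y with
    | nil => simp [lcp]
    | cons b y =>
      simp only [lcp]
      split_ifs with hab
      · subst hab; simp [List.take_succ_cons, ih y]
      · simp

theorem lcp_ge_common : ∀ p x y : List Char, p <+: x → p <+: y → p.length ≤ lcp x y := by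
  intro p
  induction p with
  | nil => intro x y _ _; simp
  | cons c p ih =>
    intro x y hx hy
    obtain ⟨t, rfl⟩ := hx
    obtain ⟨u, rfl⟩ := hy
    simp only [List.cons_append, lcp, if_true, List.length_cons]
    have := ih (p ++ t) (p ++ u) (List.prefix_append p t) (List.prefix_append p u)
    omega

theorem take_prefix_of_le_lcp_left (x y : List Char) (d : Nat) (h : d ≤ lcp x y) :
    y.take d <+: x := by
  have h1 : y.take d = (y.take (lcp x y)).take d := by rw [List.take_take, Nat.min_eq_left h]
  rw [h1, ← lcp_take_eq, List.take_take, Nat.min_eq_left h]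
  exact List.take_prefix d x

theorem take_prefix_of_le_lcp_right (x y : List Char) (d : Nat) (h : d ≤ lcp x y) :
    x.take d <+: y := by
  have h1 : x.take d = (x.take (lcp x y)).take d := by rw [List.take_take, Nat.min_eq_left h]
  rw [h1, lcp_take_eq, List.take_take, Nat.min_eq_left h]
  exact List.take_prefix d y

theorem not_append_lt_self : ∀ (p t : List Char), ¬ (p ++ t) < p := by
  intro p
  induction p with
  | nil => intro t h; exact List.not_lt_nil _ h
  | cons c p ih =>
    intro t h
    rw [List.cons_append, List.cons_lt_cons_iff] at h
    rcases h with h | ⟨_, h⟩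
    · exact lt_irrefl _ h
    · exact ih t h

theorem not_lt_of_prefix (p x : List Char) (h : p <+: x) : ¬ x < p := by
  obtain ⟨t, rfl⟩ := h
  exact not_append_lt_self p t

theorem lcp_lt_right_len (x y : List Char) (h : x < y) : lcp x y < y.length := by
  rcases Nat.lt_or_ge (lcp x y) y.length with h1 | h1
  · exact h1
  · exfalso
    have he : lcp x y = y.length := le_antisymm (lcp_le_right x y) h1
    have hpre : y.take (lcp x y) <+: x := take_prefix_of_le_lcp_left x y _ le_rfl
    rw [he, List.take_length] at hpre
    exact not_lt_of_prefix y x hpre h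

-- between two strings sharing a prefix, every string shares it too (lexicographic order)
theorem between_prefix : ∀ (p x y z : List Char), x ≤ y → y ≤ z → p <+: x → p <+: z →
    p <+: y := by
  intro p
  induction p with
  | nil => intro x y z _ _ _ _; exact List.nil_prefix
  | cons c p ih =>
    intro x y z hxy hyz hpx hpz
    obtain ⟨t, rfl⟩ := hpx
    obtain ⟨u, rfl⟩ := hpz
    cases y with
    | nil =>
      exfalso
      have : (c :: (p ++ t)) < [] := lt_of_le_of_ne hxy (by simp)
      exact List.not_lt_nil _ this
    | cons b y' =>
      rw [← not_lt] at hxy hyz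
      have hbc : b = c := by
        by_contra hne
        rcases lt_or_gt_of_ne (a := b) (b := c) hne with hlt | hgt
        · exact hxy (List.cons_lt_cons_iff.mpr (Or.inl hlt))
        · exact hyz (List.cons_lt_cons_iff.mpr (Or.inl hgt))
      subst hbc
      have h1 : ¬ y' < p ++ t := fun hh => hxy (List.cons_lt_cons_iff.mpr (Or.inr ⟨rfl, hh⟩))
      have h2 : ¬ p ++ u < y' := fun hh => hyz (List.cons_lt_cons_iff.mpr (Or.inr ⟨rfl, hh⟩))
      have := ih (p ++ t) y' (p ++ u) (not_lt.mp h1) (not_lt.mp h2)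
        (List.prefix_append p t) (List.prefix_append p u)
      exact List.cons_prefix_cons.mpr ⟨rfl, this⟩

-- ---- B-side: the prefix counter counts the words having that prefix ----
-- proof-side names for the two dictionaries the single pass of B builds
def buildCnt (words : List String) : PySem.Dict String Int :=
  words.foldl (fun cnt w => prefLoop cnt w) PySem.Dict.empty

def pressV (words : List String) (w : String) : Int :=
  pressLoop (buildCnt words) w (PySem.List.pyRange 0 (PySem.Str.len w + 1) 1)

def lenI (w : String) : Int := (w.toList.length : Int)

theorem toList_prefSlice (w : String) (d : Int) (hd : 0 ≤ d) :
    (PySem.Str.slice w none (some d)).toList = w.toList.take d.toNat := by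
  simp [PySem.Str.toList_slice, PySem.List.slice_to _ hd]

theorem mem_prefixes (w p : String) :
    (p ∈ (PySem.List.pyRange 0 (PySem.Str.len w + 1) 1).map
        (fun d => PySem.Str.slice w none (some d))) ↔ p.toList <+: w.toList := by
  rw [List.mem_map]
  constructor
  · rintro ⟨d, hd, rfl⟩
    rw [PySem.List.mem_pyRange_one] at hd
    rw [toList_prefSlice w d (by omega)]
    exact List.take_prefix _ _
  · intro hpre
    refine ⟨(p.toList.length : Int), ?_, ?_⟩
    · rw [PySem.List.mem_pyRange_one, PySem.Str.len_eq]
      have h1 := hpre.length_le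
      omega
    · apply String.toList_inj.mp
      rw [toList_prefSlice w _ (by positivity)]
      simp only [Int.toNat_natCast]
      exact (List.prefix_iff_eq_take.mp hpre).symm

theorem nodup_prefixes (w : String) :
    ((PySem.List.pyRange 0 (PySem.Str.len w + 1) 1).map
        (fun d => PySem.Str.slice w none (some d))).Nodup := by
  apply List.Nodup.map_on _ (PySem.List.nodup_pyRange_one _ _)
  intro d1 h1 d2 h2 heq
  rw [PySem.List.mem_pyRange_one, PySem.Str.len_eq] at h1 h2
  have he := congrArg String.toList heq
  rw [toList_prefSlice w d1 (by omega), toList_prefSlice w d2 (by omega)] at he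
  have hl := congrArg List.length he
  rw [List.length_take, List.length_take] at hl
  omega

theorem buildCnt_getD (words : List String) (p : String) :
    (buildCnt words).getD p 0
      = (words.countP (fun x => decide (p.toList <+: x.toList)) : Int) := by
  suffices aux : ∀ (l : List String) (cnt : PySem.Dict String Int),
      (l.foldl (fun cnt w => prefLoop cnt w) cnt).getD p 0
      = cnt.getD p 0 + (l.countP (fun x => decide (p.toList <+: x.toList)) : Int) by
    have := aux words PySem.Dict.empty
    rw [buildCnt, this]
    simp [PySem.Dict.getD_empty]
  intro l
  induction l with
  | nil => intro cnt; simp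
  | cons w rest ih =>
    intro cnt
    rw [List.foldl_cons, ih]
    have hinner : (prefLoop cnt w).getD p 0
        = cnt.getD p 0 + (if p.toList <+: w.toList then 1 else 0) := by
      unfold prefLoop
      rw [← List.foldl_map (f := fun d : Int => PySem.Str.slice w none (some d))
        (g := fun (c : PySem.Dict String Int) (q : String) => c.insert q (c.getD q 0 + 1))
        (l := PySem.List.pyRange 0 (PySem.Str.len w + 1) 1) (init := cnt)]
      rw [PySem.Dict.getD_foldl_insert_add_one]
      congr 1
      rw [List.Nodup.count (nodup_prefixes w)]
      by_cases hmem : p.toList <+: w.toList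
      · rw [if_pos ((mem_prefixes w p).mpr hmem), if_pos hmem]; norm_num
      · rw [if_neg (fun hc => hmem ((mem_prefixes w p).mp hc)), if_neg hmem]; norm_num
    rw [hinner, List.countP_cons]
    by_cases h : p.toList <+: w.toList
    · simp only [h, decide_true, if_pos]; push_cast; ring
    · simp only [h, decide_false, if_false]; push_cast; ring

-- counting by POSITION (the list may hold duplicate words)
theorem countP_eq_one_iff_pos {α : Type} (q : α → Bool) :
    ∀ (l : List α) (k : Nat) (hk : k < l.length), q l[k] = true →
      (l.countP q = 1 ↔ ∀ j, (hj : j < l.length) → q l[j] = true → j = k) := by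
  intro l
  induction l with
  | nil => intro k hk; simp at hk
  | cons h t ih =>
    intro k hk hq
    cases k with
    | zero =>
      simp only [List.getElem_cons_zero] at hq
      rw [List.countP_cons, if_pos hq]
      have hz : t.countP q + 1 = 1 ↔ t.countP q = 0 := by omega
      rw [hz, List.countP_eq_zero]
      constructor
      · intro hnone j hj hqj
        cases j with
        | zero => rfl
        | succ j =>
          exfalso
          have hj' : j < t.length := by simpa using hj
          rw [List.getElem_cons_succ] at hqj
          exact absurd hqj (hnone t[j] (List.getElem_mem _))
      · intro hall x hx
        obtain ⟨j, hj, rfl⟩ := List.mem_iff_getElem.mp hx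
        intro hqx
        have := hall (j + 1) (by simpa using hj) (by simpa using hqx)
        omega
    | succ k =>
      simp only [List.getElem_cons_succ] at hq
      have hk' : k < t.length := by simpa using hk
      rw [List.countP_cons]
      have hpos : 0 < t.countP q :=
        List.countP_pos_iff.mpr ⟨t[k], List.getElem_mem _, hq⟩
      by_cases hqh : q h = true
      · rw [if_pos hqh]
        constructor
        · intro h1; omega
        · intro hall
          exfalso
          have := hall 0 (by omega) (by simpa using hqh)
          omega
      · rw [if_neg hqh]
        rw [Nat.add_zero, ih k hk' hq]
        constructor
        · intro hall j hj hqj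
          cases j with
          | zero => simp only [List.getElem_cons_zero] at hqj; exact absurd hqj hqh
          | succ j =>
            rw [List.getElem_cons_succ] at hqj
            have := hall j (by simpa using hj) hqj
            omega
        · intro hall j hj hqj
          have := hall (j + 1) (by simpa using hj) (by simpa using hqj)
          omega

theorem lcp_self : ∀ x : List Char, lcp x x = x.length := by
  intro x
  induction x with
  | nil => simp [lcp]
  | cons a x ih => simp [lcp, ih]

-- in a ≤-sorted list, some word at ANOTHER POSITION shares the first d characters of
-- l[k] exactly when an adjacent neighbour does
theorem shared_iff (l : List String) (hs : l.Pairwise (· ≤ ·)) (k : Nat) (hk : k < l.length)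
    (d : Nat) (hd2 : d ≤ l[k].toList.length) :
    ((∃ j, ∃ _ : j < l.length, j ≠ k ∧ l[k].toList.take d <+: l[j].toList) ↔
      ((0 < k ∧ d ≤ lcpAt l (k - 1)) ∨ (k + 1 < l.length ∧ d ≤ lcpAt l k))) := by
  have hpg := List.pairwise_iff_getElem.mp hs
  have hleD : ∀ i j : Nat, i ≤ j → (hj : j < l.length) → l.getD i "" ≤ l.getD j "" := by
    intro i j hij hj
    rcases Nat.lt_or_ge i j with h | h
    · rw [List.getD_eq_getElem l "" (by omega), List.getD_eq_getElem l "" hj]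
      exact hpg i j (by omega) hj h
    · have : i = j := by omega
      subst this
      exact le_rfl
  have hwk : l.getD k "" = l[k] := List.getD_eq_getElem l "" hk
  constructor
  · rintro ⟨j, hj, hne, hpre⟩
    have hjD : l.getD j "" = l[j] := List.getD_eq_getElem l "" hj
    have hplen : (l[k].toList.take d).length = d := by
      rw [List.length_take]; omega
    rcases lt_trichotomy j k with hjk | hjk | hjk
    · refine Or.inl ⟨by omega, ?_⟩
      have h1 : l.getD j "" ≤ l.getD (k - 1) "" := hleD j (k - 1) (by omega) (by omega)
      have h2 : l.getD (k - 1) "" ≤ l.getD k "" := hleD (k - 1) k (by omega) hk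
      have hbet := between_prefix (l[k].toList.take d) (l.getD j "").toList
        (l.getD (k - 1) "").toList (l.getD k "").toList
        (String.le_iff_toList_le.mp h1) (String.le_iff_toList_le.mp h2)
        (by rw [hjD]; exact hpre) (by rw [hwk]; exact List.take_prefix d _)
      have := lcp_ge_common (l[k].toList.take d) (l.getD (k - 1) "").toList
        (l.getD k "").toList hbet (by rw [hwk]; exact List.take_prefix d _)
      rw [hplen] at this
      unfold lcpAt
      have hkk : k - 1 + 1 = k := by omega
      rw [hkk]
      exact this
    · exact absurd hjk hne
    · refine Or.inr ⟨by omega, ?_⟩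
      have h1 : l.getD k "" ≤ l.getD (k + 1) "" := hleD k (k + 1) (by omega) (by omega)
      have h2 : l.getD (k + 1) "" ≤ l.getD j "" := hleD (k + 1) j (by omega) hj
      have hbet := between_prefix (l[k].toList.take d) (l.getD k "").toList
        (l.getD (k + 1) "").toList (l.getD j "").toList
        (String.le_iff_toList_le.mp h1) (String.le_iff_toList_le.mp h2)
        (by rw [hwk]; exact List.take_prefix d _) (by rw [hjD]; exact hpre)
      have := lcp_ge_common (l[k].toList.take d) (l.getD k "").toList
        (l.getD (k + 1) "").toList (by rw [hwk]; exact List.take_prefix d _) hbet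
      rw [hplen] at this
      exact this
  · rintro (⟨hk0, hd⟩ | ⟨hk1, hd⟩)
    · refine ⟨k - 1, by omega, by omega, ?_⟩
      have hkk : k - 1 + 1 = k := by omega
      unfold lcpAt at hd
      rw [hkk] at hd
      have := take_prefix_of_le_lcp_left (l.getD (k - 1) "").toList
        (l.getD k "").toList d hd
      rw [hwk] at this
      rwa [List.getD_eq_getElem l "" (by omega)] at this
    · refine ⟨k + 1, by omega, by omega, ?_⟩
      have := take_prefix_of_le_lcp_right (l.getD k "").toList
        (l.getD (k + 1) "").toList d hd
      rw [hwk] at this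
      rwa [List.getD_eq_getElem l "" (by omega)] at this

-- ---- the press loop finds the threshold ----
theorem pressLoop_eq (cnt : PySem.Dict String Int) (w : String) (L : Nat)
    (hL : PySem.Str.len w = (L : Int)) (m : Int) (hm : 0 ≤ m)
    (hcond : ∀ d : Int, 0 ≤ d → d ≤ (L : Int) →
      ((cnt.getD (PySem.Str.slice w none (some d)) 0 == 1) = true ↔ m < d)) :
    pressLoop cnt w (PySem.List.pyRange 0 ((L : Int) + 1) 1)
      = if m + 1 ≤ (L : Int) then m + 1 else (L : Int) := by
  suffices aux : ∀ (n : Nat) (s : Int), 0 ≤ s → s ≤ m + 1 → ((L : Int) + 1 - s).toNat = n →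
      pressLoop cnt w (PySem.List.pyRange s ((L : Int) + 1) 1)
        = if m + 1 ≤ (L : Int) then m + 1 else (L : Int) by
    exact aux ((L : Int) + 1 - 0).toNat 0 le_rfl (by omega) rfl
  intro n
  induction n with
  | zero =>
    intro s hs1 hs2 hn
    rw [PySem.List.pyRange_one_eq_nil (by omega)]
    simp only [pressLoop, hL]
    rw [if_neg (by omega)]
  | succ n ih =>
    intro s hs1 hs2 hn
    rw [PySem.List.pyRange_one_cons (by omega)]
    simp only [pressLoop]
    by_cases heq : s = m + 1
    · rw [if_pos ((hcond s (by omega) (by omega)).mpr (by omega))]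
      rw [if_pos (by omega)]
      omega
    · rw [if_neg (fun hc => by have := (hcond s (by omega) (by omega)).mp hc; omega)]
      exact ih (s + 1) (by omega) (by omega) (by omega)

-- ---- per-word agreement with A's sorted pattern ----
theorem perword_press (words l : List String) (hperm : l.Perm words)
    (hs : l.Pairwise (· ≤ ·)) (hN : 2 ≤ l.length) (k : Nat) (hk : k < l.length)
    (hfirst : k = 0 ∨ l.getD k "" ≠ l.getD (k - 1) "") :
    (if k < l.length - 1 then fAt l k
      else if k = l.length - 1 then gAt l k else 0) = pressV words l[k] := by
  set L : Nat := l[k].toList.length with hLdef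
  have hL : PySem.Str.len l[k] = (L : Int) := by rw [PySem.Str.len_eq]
  obtain ⟨m, hmdef⟩ : ∃ m : Int, m = max (if 0 < k then (lcpAt l (k - 1) : Int) else 0)
    (if k + 1 < l.length then (lcpAt l k : Int) else 0) := ⟨_, rfl⟩
  have hm : 0 ≤ m := by rw [hmdef]; split_ifs <;> omega
  have hwkD : l.getD k "" = l[k] := List.getD_eq_getElem l "" hk
  have hcond : ∀ d : Int, 0 ≤ d → d ≤ (L : Int) →
      (((buildCnt words).getD (PySem.Str.slice l[k] none (some d)) 0 == 1) = true ↔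
        m < d) := by
    intro d hd1 hd2
    have hdt2 : d.toNat ≤ L := by omega
    have hptl : (PySem.Str.slice l[k] none (some d)).toList = l[k].toList.take d.toNat :=
      toList_prefSlice l[k] d (by omega)
    rw [buildCnt_getD words _, hptl]
    rw [← hperm.countP_eq]
    rw [beq_iff_eq, Nat.cast_eq_one]
    rw [countP_eq_one_iff_pos _ l k hk
      (by simp only [decide_eq_true_eq]; exact List.take_prefix _ _)]
    have hsh := shared_iff l hs k hk d.toNat hdt2
    constructor
    · intro hall
      by_contra hnot
      have hdm : d ≤ m := not_lt.mp hnot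
      have hdisj : (0 < k ∧ d.toNat ≤ lcpAt l (k - 1)) ∨
          (k + 1 < l.length ∧ d.toNat ≤ lcpAt l k) := by
        by_cases hd0 : d ≤ 0
        · rcases Nat.eq_zero_or_pos k with hk0 | hk0
          · right
            exact ⟨by omega, by omega⟩
          · left
            exact ⟨hk0, by omega⟩
        · rw [hmdef] at hdm
          rcases le_max_iff.mp hdm with h | h
          · left
            constructor
            · by_contra hk0; rw [if_neg hk0] at h; omega
            · split_ifs at h <;> omega
          · right
            constructor
            · by_contra hk1; rw [if_neg hk1] at h; omega
            · split_ifs at h <;> omega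
      obtain ⟨j, hj, hne, hpre⟩ := hsh.mpr hdisj
      exact hne (hall j hj (by simp only [decide_eq_true_eq]; exact hpre))
    · intro hmd j hj hqj
      by_contra hne
      have hdisj := hsh.mp ⟨j, hj, hne, by simpa using hqj⟩
      rcases hdisj with ⟨hk0, hle⟩ | ⟨hk1, hle⟩
      · have hbd : (if 0 < k then (lcpAt l (k - 1) : Int) else 0) ≤ m := by
          rw [hmdef]; exact le_max_left _ _
        rw [if_pos hk0] at hbd
        clear hmdef hsh hqj
        omega
      · have hbd : (if k + 1 < l.length then (lcpAt l k : Int) else 0) ≤ m := by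
          rw [hmdef]; exact le_max_right _ _
        rw [if_pos hk1] at hbd
        clear hmdef hsh hqj
        omega
  rw [pressV, hL, pressLoop_eq (buildCnt words) l[k] L hL m hm hcond]
  have hlcpL : 0 < k → lcpAt l (k - 1) < L := by
    intro hk0
    have hle : l.getD (k - 1) "" ≤ l.getD k "" := by
      rw [List.getD_eq_getElem l "" (by omega), hwkD]
      exact List.pairwise_iff_getElem.mp hs (k - 1) k (by omega) hk (by omega)
    have hne : l.getD (k - 1) "" ≠ l.getD k "" := by
      rcases hfirst with h | h
      · omega
      · exact fun hc => h hc.symm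
    have hlt : l.getD (k - 1) "" < l.getD k "" := lt_of_le_of_ne hle hne
    have hll := lcp_lt_right_len (l.getD (k - 1) "").toList (l.getD k "").toList
      (String.lt_iff_toList_lt.mp hlt)
    unfold lcpAt
    have hkk : k - 1 + 1 = k := by omega
    rw [hkk]
    rw [hwkD] at hll ⊢
    omega
  rw [hmdef]
  unfold fAt gAt
  rw [hwkD]
  by_cases hk0 : k = 0
  · subst hk0
    have hk1 : 0 + 1 < l.length := by omega
    rw [if_pos hk1]
    simp only [if_neg (by omega : ¬ (0 : Nat) < 0)]
    rw [if_pos (by omega : 0 < l.length - 1)]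
    simp only [if_true]
    omega
  · have hk0' : 0 < k := by omega
    rw [if_pos hk0', if_neg hk0]
    have hlcp := hlcpL hk0'
    by_cases hk1 : k + 1 < l.length
    · rw [if_pos hk1, if_pos (by omega : k < l.length - 1)]
      omega
    · rw [if_neg hk1, if_neg (by omega : ¬ k < l.length - 1),
        if_pos (by omega : k = l.length - 1)]
      omega

theorem perword_dup (l : List String) (k : Nat) (hk : k < l.length) (hk0 : 0 < k)
    (heq : l.getD k "" = l.getD (k - 1) "") :
    (if k < l.length - 1 then fAt l k
      else if k = l.length - 1 then gAt l k else 0) = lenI l[k] + 1 := by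
  have hwkD : l.getD k "" = l[k] := List.getD_eq_getElem l "" hk
  have hg : gAt l k = lenI l[k] + 1 := by
    unfold gAt
    rw [if_neg (by omega : ¬ k = 0)]
    unfold lcpAt
    have hkk : k - 1 + 1 = k := by omega
    rw [hkk, ← heq, lcp_self, lenI, hwkD]
  have hmin : min ((l.getD k "").toList.length : Int) ((lcpAt l k : Int) + 1)
      ≤ lenI l[k] := by
    rw [hwkD, lenI]
    omega
  by_cases hk1 : k < l.length - 1
  · rw [if_pos hk1]
    unfold fAt
    rw [hg] at *
    omega
  · rw [if_neg hk1, if_pos (by omega : k = l.length - 1)]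
    exact hg

-- ---- turning the positional sum over the sorted list into a head-chain ----
def chainT (words : List String) : String → List String → Int
  | _, [] => 0
  | prev, h :: t => (if h = prev then lenI h + 1 else pressV words h) + chainT words h t

def headSum (words : List String) : List String → Int
  | [] => 0
  | h :: t => pressV words h + chainT words h t

theorem chain_pos (words : List String) : ∀ (t : List String) (prev : String),
    ((List.range t.length).map (fun k =>
      if t.getD k "" = (if k = 0 then prev else t.getD (k - 1) "") then
        lenI (t.getD k "") + 1 else pressV words (t.getD k ""))).sum
    = chainT words prev t := by
  intro t
  induction t with
  | nil => intro prev; simp [chainT]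
  | cons h t ih =>
    intro prev
    rw [List.length_cons, List.range_succ_eq_map, List.map_cons, List.map_map, List.sum_cons]
    rw [chainT]
    congr 1
    rw [← ih h]
    congr 1
    apply List.map_congr_left
    intro k hkm
    simp only [Function.comp]
    have h2 : ¬ (k + 1 = 0) := by omega
    rw [if_neg h2]
    have h1 : (h :: t).getD (k + 1) "" = t.getD k "" := rfl
    have h3 : k + 1 - 1 = k := by omega
    rw [h1, h3]
    have h4 : (h :: t).getD k "" = if k = 0 then h else t.getD (k - 1) "" := by
      cases k with
      | zero => rfl
      | succ k => simp
    rw [h4]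

theorem sum_pattern_eq_headSum (words l : List String) (hperm : l.Perm words)
    (hs : l.Pairwise (· ≤ ·)) (hN : 2 ≤ l.length) :
    ((List.range l.length).map (fun k => if k < l.length - 1 then fAt l k
      else if k = l.length - 1 then gAt l k else 0)).sum = headSum words l := by
  have hcongr : (List.range l.length).map (fun k => if k < l.length - 1 then fAt l k
      else if k = l.length - 1 then gAt l k else 0)
      = (List.range l.length).map (fun k =>
          if k = 0 then pressV words (l.getD 0 "")
          else if l.getD k "" = l.getD (k - 1) "" then lenI (l.getD k "") + 1
          else pressV words (l.getD k "")) := by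
    apply List.map_congr_left
    intro k hkm
    have hk : k < l.length := List.mem_range.mp hkm
    have hwkD : l.getD k "" = l[k] := List.getD_eq_getElem l "" hk
    by_cases hk0 : k = 0
    · subst hk0
      rw [if_pos rfl, hwkD]
      exact perword_press words l hperm hs hN 0 hk (Or.inl rfl)
    · rw [if_neg hk0]
      by_cases hdup : l.getD k "" = l.getD (k - 1) ""
      · rw [if_pos hdup, hwkD]
        exact perword_dup l k hk (by omega) hdup
      · rw [if_neg hdup, hwkD]
        exact perword_press words l hperm hs hN k hk (Or.inr hdup)
  rw [hcongr]
  cases l with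
  | nil => simp [headSum]
  | cons h t =>
    rw [List.length_cons, List.range_succ_eq_map, List.map_cons, List.map_map, List.sum_cons]
    rw [headSum]
    congr 1
    rw [← chain_pos words t h]
    congr 1
    apply List.map_congr_left
    intro k hkm
    simp only [Function.comp]
    have h2 : ¬ (k + 1 = 0) := by omega
    rw [if_neg h2]
    have h1 : (h :: t).getD (k + 1) "" = t.getD k "" := rfl
    have h3 : k + 1 - 1 = k := by omega
    rw [h1, h3]
    have h4 : (h :: t).getD k "" = if k = 0 then h else t.getD (k - 1) "" := by
      cases k with
      | zero => rfl
      | succ k => simp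
    rw [h4]

-- ---- grouping the chain by distinct words ----
theorem chain_count (words : List String) : ∀ (t : List String) (prev : String),
    t.Pairwise (· ≤ ·) → (∀ x ∈ t, prev ≤ x) →
    chainT words prev t = (t.count prev : Int) * (lenI prev + 1)
      + (((PySem.Set.ofList t).filter (fun w => !(w == prev))).map
          (fun w => pressV words w + ((t.count w : Int) - 1) * (lenI w + 1))).sum := by
  intro t
  induction t with
  | nil => intro prev _ _; simp [chainT]
  | cons h t ih =>
    intro prev hp hall
    have hp1 : ∀ x ∈ t, h ≤ x := (List.pairwise_cons.mp hp).1
    have hp2 : t.Pairwise (· ≤ ·) := (List.pairwise_cons.mp hp).2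
    rw [chainT, ih h hp2 hp1, PySem.Set.ofList_cons]
    by_cases heq : h = prev
    · subst heq
      rw [if_pos rfl]
      rw [List.count_cons_self]
      have hfil : (h :: (PySem.Set.ofList t).discard h).filter (fun w => !(w == h))
          = ((PySem.Set.ofList t).filter (fun w => !(w == h))).filter
              (fun w => !(w == h)) := by
        rw [List.filter_cons_of_neg (by simp)]
        rfl
      rw [hfil, List.filter_filter]
      have hfil2 : (PySem.Set.ofList t).filter (fun w => !(w == h) && !(w == h))
          = (PySem.Set.ofList t).filter (fun w => !(w == h)) := by
        apply List.filter_congr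
        intro w _
        cases hw : (w == h) <;> rfl
      rw [hfil2]
      have hmap : ((PySem.Set.ofList t).filter (fun w => !(w == h))).map
            (fun w => pressV words w + (((h :: t).count w : Int) - 1) * (lenI w + 1))
          = ((PySem.Set.ofList t).filter (fun w => !(w == h))).map
            (fun w => pressV words w + ((t.count w : Int) - 1) * (lenI w + 1)) := by
        apply List.map_congr_left
        intro w hw
        have hne : w ≠ h := by
          have := (List.mem_filter.mp hw).2
          simpa using this
        rw [List.count_cons_of_ne (Ne.symm hne)]
      rw [hmap]
      push_cast
      ring
    · rw [if_neg heq]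
      have hprevnot : prev ∉ (h :: t) := by
        intro hmem
        rcases List.mem_cons.mp hmem with hc | hc
        · exact heq hc.symm
        · have h1 := hp1 prev hc
          have h2 := hall h (by simp)
          exact heq (le_antisymm h1 h2)
      have hcnt0 : (h :: t).count prev = 0 := List.count_eq_zero.mpr hprevnot
      rw [hcnt0]
      have hfil : (h :: (PySem.Set.ofList t).discard h).filter (fun w => !(w == prev))
          = h :: ((PySem.Set.ofList t).discard h).filter (fun w => !(w == prev)) :=
        List.filter_cons_of_pos (by simpa using heq)
      have hfil2 : ((PySem.Set.ofList t).discard h).filter (fun w => !(w == prev))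
          = (PySem.Set.ofList t).discard h := by
        apply List.filter_eq_self.mpr
        intro w hw
        have hwmem : w ∈ PySem.Set.ofList t := ((PySem.Set.mem_discard _ _ _).mp hw).1
        have : w ∈ t := (PySem.Set.mem_ofList _ _).mp hwmem
        have : w ≠ prev := by
          intro hc
          subst hc
          exact hprevnot (List.mem_cons_of_mem _ this)
        simpa using this
      rw [hfil, hfil2, List.map_cons, List.sum_cons]
      have hch : ((h :: t).count h : Int) - 1 = (t.count h : Int) := by
        rw [List.count_cons_self]
        push_cast
        ring
      have hmap : ((PySem.Set.ofList t).discard h).map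
            (fun w => pressV words w + (((h :: t).count w : Int) - 1) * (lenI w + 1))
          = ((PySem.Set.ofList t).filter (fun w => !(w == h))).map
            (fun w => pressV words w + ((t.count w : Int) - 1) * (lenI w + 1)) := by
        have hdd : (PySem.Set.ofList t).discard h
            = (PySem.Set.ofList t).filter (fun w => !(w == h)) := rfl
        rw [hdd]
        apply List.map_congr_left
        intro w hw
        have hne : w ≠ h := by
          have := (List.mem_filter.mp hw).2
          simpa using this
        rw [List.count_cons_of_ne (Ne.symm hne)]
      rw [hmap, hch]
      push_cast
      ring

theorem headSum_eq_setSum (words l : List String) (hs : l.Pairwise (· ≤ ·)) :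
    headSum words l = ((PySem.Set.ofList l).map
      (fun w => pressV words w + ((l.count w : Int) - 1) * (lenI w + 1))).sum := by
  cases l with
  | nil => simp [headSum]
  | cons h t =>
    have hp1 : ∀ x ∈ t, h ≤ x := (List.pairwise_cons.mp hs).1
    have hp2 : t.Pairwise (· ≤ ·) := (List.pairwise_cons.mp hs).2
    rw [headSum, chain_count words t h hp2 hp1, PySem.Set.ofList_cons,
      List.map_cons, List.sum_cons]
    have hch : ((h :: t).count h : Int) - 1 = (t.count h : Int) := by
      rw [List.count_cons_self]
      push_cast
      ring
    have hmap : ((PySem.Set.ofList t).discard h).map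
          (fun w => pressV words w + (((h :: t).count w : Int) - 1) * (lenI w + 1))
        = ((PySem.Set.ofList t).filter (fun w => !(w == h))).map
          (fun w => pressV words w + ((t.count w : Int) - 1) * (lenI w + 1)) := by
      have hdd : (PySem.Set.ofList t).discard h
          = (PySem.Set.ofList t).filter (fun w => !(w == h)) := rfl
      rw [hdd]
      apply List.map_congr_left
      intro w hw
      have hne : w ≠ h := by
        have := (List.mem_filter.mp hw).2
        simpa using this
      rw [List.count_cons_of_ne (Ne.symm hne)]
    rw [hmap, hch]
    ring

-- ---- B's output in the same distinct-word form ----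
theorem solution_alt_eq_setSum (words : List String) :
    solution_alt words = ((PySem.Set.ofList words).map
      (fun w => pressV words w + ((words.count w : Int) - 1) * (lenI w + 1))).sum := by
  unfold solution_alt
  rw [PySem.List.foldl_prod_mk
    (f := fun (c : PySem.Dict String Int) (w : String) => prefLoop c w)
    (g := fun (d : PySem.Dict String Int) (w : String) => d.insert w (d.getD w 0 + 1))]
  rw [PySem.Dict.foldl_insert_getD_add_one_eq_counter]
  simp only []
  rw [PySem.Dict.items_counter]
  rw [PySem.List.foldl_add]
  rw [List.map_map]
  simp only [Int.zero_add]
  apply congrArg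
  apply List.map_congr_left
  intro w hw
  simp only [Function.comp]
  rw [PySem.Str.len_eq]
  rfl

theorem solution_eq_alt (words : List String) : solution words = solution_alt words := by
  rcases Nat.lt_or_ge words.length 2 with h0 | hN
  · match words, h0 with
    | [], _ => decide
    | [w], _ =>
      have hA : solution [w] = 0 := by
        rw [solution_eq_fold]
        norm_num
      have hp0 : pressV [w] w = 0 := by
        rw [pressV]
        have hlen0 : (0 : Int) ≤ PySem.Str.len w := by rw [PySem.Str.len_eq]; omega
        rw [PySem.List.pyRange_one_cons (by omega)]
        simp only [pressLoop]
        have hslice : PySem.Str.slice w none (some 0) = "" := by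
          apply String.toList_inj.mp
          rw [toList_prefSlice w 0 le_rfl]
          rfl
        rw [hslice, buildCnt_getD]
        norm_num
      rw [hA, solution_alt_eq_setSum]
      have hone : PySem.Set.ofList [w] = [w] := rfl
      rw [hone, List.map_singleton, List.sum_singleton, hp0]
      simp
  · rw [solution_eq_fold, solution_alt_eq_setSum]
    have hperm : (PySem.List.sorted words (fun x => x) false).Perm words :=
      PySem.List.sorted_perm words (fun x => x) false
    have hs : (PySem.List.sorted words (fun x => x) false).Pairwise (· ≤ ·) :=
      PySem.List.sorted_pairwise words (fun x => x)
    have hlen : (PySem.List.sorted words (fun x => x) false).length = words.length :=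
      hperm.length_eq
    have hc : ((words.length : Int) - 1) = ((words.length - 1 : Nat) : Int) := by omega
    rw [hc, Int.toNat_natCast, ← hlen,
      foldA (PySem.List.sorted words (fun x => x) false)
        ((PySem.List.sorted words (fun x => x) false).length - 1) (by omega)]
    rw [sum_pattern_eq_headSum words (PySem.List.sorted words (fun x => x) false)
      hperm hs (by omega)]
    rw [headSum_eq_setSum words (PySem.List.sorted words (fun x => x) false) hs]
    have hfun : ∀ w ∈ PySem.Set.ofList (PySem.List.sorted words (fun x => x) false),
        pressV words w + (((PySem.List.sorted words (fun x => x) false).count w : Int) - 1)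
            * (lenI w + 1)
          = pressV words w + ((words.count w : Int) - 1) * (lenI w + 1) := by
      intro w _
      rw [hperm.count_eq]
    rw [List.map_congr_left hfun]
    apply List.Perm.sum_eq
    apply List.Perm.map
    apply (List.perm_ext_iff_of_nodup (PySem.Set.nodup_ofList _)
      (PySem.Set.nodup_ofList _)).mpr
    intro a
    rw [PySem.Set.mem_ofList, PySem.Set.mem_ofList]
    exact hperm.mem_iff

-- ===== VERDICT (by name: the statement is the Claim_ definition above) =====
theorem solution_spec : Claim_equal_solution := by
  intro words _ _
  exact solution_eq_alt words

@[simp]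
theorem solution_raises : Claim_raises_solution := by
  unfold Claim_raises_solution
  refine ⟨?_, by decide, by decide, by decide⟩
  rintro words _ ⟨hmem, hlen⟩ hpre
  have := hpre hmem
  omega
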